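-- pv_equiv track=rewrite | github.com/tbilsborrow/advent-of-code-2020 | 2020-6-1.py | multilinereader
-- ===== SOURCE A (Python) =====
-- def multilinereader(lines):
--     '''concats multiple lines into one, generating new one upon blank line'''
--     concat = ''
--     for line in lines:
--         if len(line.strip()) == 0:
--             if len(concat) > 0:
--                 yield concat
--             concat = ''
--         concat += line.strip()
--     if len(concat) > 0:
--         yield concat
-- ===== SOURCE B (Python) =====
-- def multilinereader(lines):
--     '''concats multiple lines into one, generating new one upon blank line'''
--     stripped = [line.strip() for line in lines]
--     n = len(stripped)
--     i = 0
--     while i < n: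
--         while i < n and stripped[i] == '':
--             i += 1
--         j = i
--         while j < n and stripped[j] != '':
--             j += 1
--         if i < j:
--             yield ''.join(stripped[i:j])
--         i = j
-- ===== Notes on version B (the rewrite author's own statement) =====
-- stated objective: alternative
-- what changed: Replaces A's streaming accumulator-string with flush-on-blank sentinel logic by a partition pass: strip all lines once, then repeatedly skip a run of blank lines and emit the join of the following run of non-blank lines.
import Mathlib
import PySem

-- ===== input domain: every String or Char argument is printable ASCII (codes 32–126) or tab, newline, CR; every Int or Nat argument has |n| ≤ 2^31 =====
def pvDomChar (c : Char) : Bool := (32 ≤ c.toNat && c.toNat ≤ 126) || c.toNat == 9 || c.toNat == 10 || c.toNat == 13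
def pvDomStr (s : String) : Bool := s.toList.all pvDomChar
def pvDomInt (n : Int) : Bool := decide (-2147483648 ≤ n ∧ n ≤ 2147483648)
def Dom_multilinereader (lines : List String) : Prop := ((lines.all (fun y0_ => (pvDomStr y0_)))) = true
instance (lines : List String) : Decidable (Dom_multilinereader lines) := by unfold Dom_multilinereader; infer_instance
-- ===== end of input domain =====

-- B replaces A's streaming accumulator-and-flush sentinel logic by a partition pass
-- (skip a blank run, take a non-blank run, join it); objective: alternative decomposition.

-- ===== PORT A =====
-- one loop step of A: flush-on-blank, then concat += line.strip()
def mlrStepA (st : List String × String) (line : String) : List String × String :=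
  let s := PySem.Str.strip line
  let st' :=
    if PySem.Str.len s == 0 then
      ((if PySem.Str.len st.2 > 0 then st.1 ++ [st.2] else st.1), "")
    else st
  (st'.1, st'.2 ++ s)

-- the final 'if len(concat) > 0: yield concat'
def mlrFlushA (r : List String × String) : List String :=
  if PySem.Str.len r.2 > 0 then r.1 ++ [r.2] else r.1

def multilinereader (lines : List String) : List String :=
  mlrFlushA (lines.foldl mlrStepA ([], ""))

-- ===== PORT B =====
def mlrNonblank (t : String) : Bool := t != ""

-- B's while-loop over the stripped lines: skip a blank run, emit the join of a non-blank run
def mlrGroups : List String → List String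
  | [] => []
  | s :: rest =>
    if s == "" then mlrGroups rest
    else
      PySem.Str.join "" (s :: rest.takeWhile mlrNonblank) ::
        mlrGroups (rest.dropWhile mlrNonblank)
termination_by l => l.length
decreasing_by
  · simp
  · simpa using Nat.lt_succ_of_le (List.length_dropWhile_le mlrNonblank rest)

def multilinereader_alt (lines : List String) : List String :=
  mlrGroups (lines.map PySem.Str.strip)

-- ===== PRECONDITION & SPEC =====
def Spec_multilinereader (lines : List String) (out : List String) : Prop := out = multilinereader_alt lines
instance (lines : List String) (out : List String) : Decidable (Spec_multilinereader lines out) := by unfold Spec_multilinereader; infer_instance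

-- ===== CLAIM (what is proved, stated in full; the proofs are below) =====
def Claim_equal_multilinereader : Prop := ∀ (lines : List String), Dom_multilinereader lines → Spec_multilinereader lines (multilinereader lines)

-- ===== LEMMAS AND PROOFS =====
lemma charsJoinNil (parts : List (List Char)) : PySem.Chars.join [] parts = parts.flatten := by
  induction parts with
  | nil => rfl
  | cons a t ih =>
    cases t with
    | nil => simp [PySem.Chars.join_singleton]
    | cons b u => simp [PySem.Chars.join_cons_cons] at *; simp [ih]

lemma strJoin_nil : PySem.Str.join "" ([] : List String) = "" := by
  apply String.toList_inj.mp; simp [PySem.Str.join]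

lemma strJoin_cons (s : String) (ps : List String) :
    PySem.Str.join "" (s :: ps) = s ++ PySem.Str.join "" ps := by
  apply String.toList_inj.mp; simp [PySem.Str.join, charsJoinNil]

lemma strLenPos (s : String) : 0 < s.length ↔ s ≠ "" := by
  rw [← String.length_toList]
  constructor
  · intro h he; subst he; simp at h
  · intro h
    have : s.toList ≠ [] := fun hn => h (String.toList_inj.mp (by simp [hn]))
    exact List.length_pos_iff.mpr this

lemma strJoin_cons_ne (s : String) (ps : List String) (hs : s ≠ "") :
    PySem.Str.join "" (s :: ps) ≠ "" := by
  rw [strJoin_cons]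
  intro h
  have := congrArg String.toList h
  simp at this
  exact hs (String.toList_inj.mp (by simp [this.1]))

-- B's pending state: the group c is still open at the front of l
def mlrPend (c : String) (l : List String) : List String :=
  let g := c ++ PySem.Str.join "" (l.takeWhile mlrNonblank)
  (if g = "" then [] else [g]) ++ mlrGroups (l.dropWhile mlrNonblank)

lemma mlrPend_empty (l : List String) : mlrPend "" l = mlrGroups l := by
  cases l with
  | nil => simp [mlrPend, strJoin_nil, mlrGroups]
  | cons s t =>
    by_cases hs : s = ""
    · subst hs
      simp [mlrPend, mlrNonblank, strJoin_nil, List.takeWhile, List.dropWhile]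
    · have hb : mlrNonblank s = true := by simp [mlrNonblank, hs]
      rw [mlrGroups]
      simp [mlrPend, List.takeWhile, List.dropWhile, hb, hs,
        strJoin_cons_ne s _ hs, String.empty_append]

lemma mlr_fold (l : List String) (out : List String) (c : String) :
    mlrFlushA (l.foldl mlrStepA (out, c)) = out ++ mlrPend c (l.map PySem.Str.strip) := by
  induction l generalizing out c with
  | nil =>
    by_cases hc : c = ""
    · subst hc
      simp [mlrFlushA, mlrPend, strJoin_nil, mlrGroups]
    · have hpos : 0 < c.length := (strLenPos c).mpr hc
      simp [mlrFlushA, mlrPend, strJoin_nil, hpos, hc, mlrGroups]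
  | cons line rest ih =>
    set s := PySem.Str.strip line with hsdef
    by_cases hs : s = ""
    · have hstep : mlrStepA (out, c) line =
          ((if 0 < c.length then out ++ [c] else out), "") := by
        simp [mlrStepA, ← hsdef, hs]
      rw [List.foldl_cons, hstep, ih]
      have htw : (s :: rest.map PySem.Str.strip).takeWhile mlrNonblank = [] := by
        simp [List.takeWhile, mlrNonblank, hs]
      have hdw : (s :: rest.map PySem.Str.strip).dropWhile mlrNonblank
          = s :: rest.map PySem.Str.strip := by
        simp [List.dropWhile, mlrNonblank, hs]
      have hgr : mlrGroups (s :: rest.map PySem.Str.strip) = mlrGroups (rest.map PySem.Str.strip) := by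
        rw [mlrGroups]; simp [hs]
      rw [mlrPend_empty]
      simp only [List.map_cons, ← hsdef, mlrPend, htw, hdw, hgr, strJoin_nil]
      by_cases hc : c = ""
      · subst hc; simp
      · have hpos : 0 < c.length := (strLenPos c).mpr hc
        simp [hpos, String.append_empty, hc]
    · have hstep : mlrStepA (out, c) line = (out, c ++ s) := by
        simp [mlrStepA, ← hsdef, hs]
      rw [List.foldl_cons, hstep, ih]
      have hb : mlrNonblank s = true := by simp [mlrNonblank, hs]
      have hpend : mlrPend c (s :: rest.map PySem.Str.strip)
          = mlrPend (c ++ s) (rest.map PySem.Str.strip) := by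
        simp only [mlrPend, List.takeWhile, List.dropWhile, hb, strJoin_cons,
          String.append_assoc]
      simp only [List.map_cons, ← hsdef, hpend]

-- ===== VERDICT (by name: the statement is the Claim_ definition above) =====
theorem multilinereader_spec : Claim_equal_multilinereader := by
  intro lines _
  show multilinereader lines = multilinereader_alt lines
  rw [multilinereader, mlr_fold, mlrPend_empty]
  rfl
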